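-- pv_equiv track=rewrite | github.com/pypi-data/pypi-mirror-392 | packages/toon-to-pdf/toon_to_pdf-0.1.0-py3-none-any.whl/toon_to_pdf/converter.py | _clean_toon_input
-- ===== SOURCE A (Python) =====
-- def _clean_toon_input(text: str) -> str:
--     """Remove comments and normalize whitespace, respecting quoted strings."""
--     processed_lines = []
--     for raw_line in text.split("\n"):
--         line_chars: list[str] = []
--         in_string = False
--         escape_next = False
--         for ch in raw_line:
--             if in_string:
--                 line_chars.append(ch)
--                 if escape_next:
--                     escape_next = False
--                     continue
--                 if ch == "\\":
--                     escape_next = True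
--                 elif ch == '"':
--                     in_string = False
--                 continue
--
--             if ch == '"':
--                 in_string = True
--                 line_chars.append(ch)
--             elif ch == "#":
--                 break
--             else:
--                 line_chars.append(ch)
--         processed_lines.append("".join(line_chars))
--     return "\n".join(processed_lines)
-- ===== SOURCE B (Python) =====
-- def _comment_start(line: str) -> int:
--     """Index where the comment begins (len(line) if none), skipping quoted strings."""
--     i = 0
--     n = len(line)
--     while i < n:
--         c = line[i]
--         if c == "#":
--             return i
--         if c == '"':
--             i += 1
--             while i < n:
--                 if line[i] == "\\":
--                     i += 2
--                 elif line[i] == '"':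
--                     i += 1
--                     break
--                 else:
--                     i += 1
--         else:
--             i += 1
--     return n
--
--
-- def _clean_toon_input(text: str) -> str:
--     """Remove comments and normalize whitespace, respecting quoted strings."""
--     return "\n".join(line[:_comment_start(line)] for line in text.split("\n"))
-- ===== Notes on version B (the rewrite author's own statement) =====
-- stated objective: alternative
-- what changed: A's per-character state machine (in_string/escape_next flags appending chars one by one) is replaced by an index-jump scanner that computes the comment start position per line (skipping whole quoted strings by jumping indices) and returns the line slice up to it.
import Mathlib
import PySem

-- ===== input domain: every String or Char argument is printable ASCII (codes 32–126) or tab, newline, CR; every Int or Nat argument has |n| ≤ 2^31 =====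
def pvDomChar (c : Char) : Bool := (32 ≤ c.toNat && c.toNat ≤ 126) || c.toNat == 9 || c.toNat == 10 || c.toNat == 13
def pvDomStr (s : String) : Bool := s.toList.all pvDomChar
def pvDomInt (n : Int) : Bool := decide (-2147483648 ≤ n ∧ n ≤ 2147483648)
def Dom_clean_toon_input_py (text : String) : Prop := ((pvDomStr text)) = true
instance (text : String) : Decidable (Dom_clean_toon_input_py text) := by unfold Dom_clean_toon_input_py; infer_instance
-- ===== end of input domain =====

-- B replaces A's per-character in_string/escape_next automaton (appending chars one by one)
-- by an index-jump scanner that finds the comment start and slices the line; objective: alternative.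

-- ===== PORT A =====
-- the inner 'for ch in raw_line' loop of A: state (in_string, escape_next), accumulator kept reversed
def lineLoopA : List Char → Bool → Bool → List Char → List Char
  | [], _, _, acc => acc.reverse
  | c :: rest, inStr, esc, acc =>
    if inStr then
      if esc then lineLoopA rest true false (c :: acc)
      else if c = '\\' then lineLoopA rest true true (c :: acc)
      else if c = '"' then lineLoopA rest false false (c :: acc)
      else lineLoopA rest true false (c :: acc)
    else
      if c = '"' then lineLoopA rest true false (c :: acc)
      else if c = '#' then acc.reverse   -- break
      else lineLoopA rest false false (c :: acc)

def clean_toon_input_py (text : String) : String :=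
  String.ofList (PySem.Chars.join ['\n']
    ((PySem.Chars.splitOn text.toList ['\n']).map (fun line => lineLoopA line false false [])))

-- ===== PORT B =====
-- the inner 'while' of B's _comment_start: chars consumed until the quoted string closes
-- ('i += 2' on a trailing backslash overshoots in Python; the count here may exceed the
--  remaining length the same way — List.take below clamps exactly as the Python slice does)
def skipStrB : List Char → Nat
  | [] => 0
  | c :: rest =>
    if c = '\\' then
      match rest with
      | [] => 2
      | _ :: rest' => 2 + skipStrB rest'
    else if c = '"' then 1
    else 1 + skipStrB rest

-- the outer 'while' of B's _comment_start
def cutB : List Char → Nat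
  | [] => 0
  | c :: rest =>
    if c = '#' then 0
    else if c = '"' then
      let k := skipStrB rest
      1 + k + cutB (rest.drop k)
    else 1 + cutB rest
termination_by l => l.length
decreasing_by all_goals (simp [List.length_drop]; try omega)

def clean_toon_input_py_alt (text : String) : String :=
  String.ofList (PySem.Chars.join ['\n']
    ((PySem.Chars.splitOn text.toList ['\n']).map (fun line => line.take (cutB line))))

-- ===== PRECONDITION & SPEC =====
def Spec_clean_toon_input_py (text : String) (out : String) : Prop := out = clean_toon_input_py_alt text
instance (text : String) (out : String) : Decidable (Spec_clean_toon_input_py text out) := by unfold Spec_clean_toon_input_py; infer_instance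

-- ===== CLAIM (what is proved, stated in full; the proofs are below) =====
def Claim_equal_clean_toon_input_py : Prop := ∀ (text : String), Dom_clean_toon_input_py text → Spec_clean_toon_input_py text (clean_toon_input_py text)

-- ===== LEMMAS AND PROOFS =====

theorem loopA_cons (c : Char) (rest : List Char) (inStr esc : Bool) (acc : List Char) :
    lineLoopA (c :: rest) inStr esc acc =
    if inStr then
      if esc then lineLoopA rest true false (c :: acc)
      else if c = '\\' then lineLoopA rest true true (c :: acc)
      else if c = '"' then lineLoopA rest false false (c :: acc)
      else lineLoopA rest true false (c :: acc)
    else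
      if c = '"' then lineLoopA rest true false (c :: acc)
      else if c = '#' then acc.reverse
      else lineLoopA rest false false (c :: acc) := rfl

theorem take_cons_add (c : Char) (rest : List Char) (k m : Nat) :
    List.take (1 + k + m) (c :: rest) =
    c :: (List.take k rest ++ List.take m (List.drop k rest)) := by
  have h : 1 + k + m = (k + m) + 1 := by omega
  rw [h, List.take_succ_cons, List.take_add]

theorem take_cons_one_add (c : Char) (rest : List Char) (k : Nat) :
    List.take (1 + k) (c :: rest) = c :: List.take k rest := by
  rw [Nat.add_comm, List.take_succ_cons]

theorem drop_cons_one_add (c : Char) (rest : List Char) (k : Nat) :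
    List.drop (1 + k) (c :: rest) = List.drop k rest := by
  rw [Nat.add_comm, List.drop_succ_cons]

theorem take_cons_two_add (c d : Char) (r : List Char) (k : Nat) :
    List.take (2 + k) (c :: d :: r) = c :: d :: List.take k r := by
  have h : 2 + k = (k + 1) + 1 := by omega
  rw [h, List.take_succ_cons, List.take_succ_cons]

theorem drop_cons_two_add (c d : Char) (r : List Char) (k : Nat) :
    List.drop (2 + k) (c :: d :: r) = List.drop k r := by
  have h : 2 + k = (k + 1) + 1 := by omega
  rw [h, List.drop_succ_cons, List.drop_succ_cons]

-- invariant for both states of A's automaton, by strong induction on the line length: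
-- outside a string A emits the cutB-prefix; inside a string A emits the skipStrB-prefix
-- and then continues outside.
theorem lineLoopA_eq_aux : ∀ (n : Nat) (l : List Char), l.length ≤ n →
    (∀ acc, lineLoopA l false false acc = acc.reverse ++ l.take (cutB l)) ∧
    (∀ acc, lineLoopA l true false acc =
      acc.reverse ++ l.take (skipStrB l) ++
        ((l.drop (skipStrB l)).take (cutB (l.drop (skipStrB l))))) := by
  intro n
  induction n with
  | zero =>
    intro l hl
    have h0 : l = [] := List.eq_nil_of_length_eq_zero (Nat.le_zero.mp hl)
    subst h0
    simp [lineLoopA, cutB, skipStrB]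
  | succ n ih =>
    intro l hl
    match l with
    | [] => simp [lineLoopA, cutB, skipStrB]
    | c :: rest =>
      have hrest : rest.length ≤ n := by simpa using hl
      constructor
      · intro acc
        by_cases hq : c = '"'
        · subst hq
          have step : lineLoopA ('"' :: rest) false false acc
              = lineLoopA rest true false ('"' :: acc) := by
            rw [loopA_cons]; simp
          rw [step, (ih rest hrest).2 ('"' :: acc)]
          have hc : cutB ('"' :: rest)
              = 1 + skipStrB rest + cutB (rest.drop (skipStrB rest)) := by
            rw [cutB]; simp
          rw [hc, take_cons_add]
          simp
        · by_cases hh : c = '#'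
          · subst hh
            have step : lineLoopA ('#' :: rest) false false acc = acc.reverse := by
              rw [loopA_cons]; simp
            have hc : cutB ('#' :: rest) = 0 := by rw [cutB]; simp
            rw [step, hc]
            simp
          · have step : lineLoopA (c :: rest) false false acc
                = lineLoopA rest false false (c :: acc) := by
              rw [loopA_cons]; simp [hq, hh]
            rw [step, (ih rest hrest).1 (c :: acc)]
            have hc : cutB (c :: rest) = 1 + cutB rest := by
              rw [cutB]; simp [hq, hh]
            rw [hc, take_cons_one_add]
            simp
      · intro acc
        by_cases hb : c = '\\'
        · subst hb
          match rest with
          | [] =>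
            have step : lineLoopA ['\\'] true false acc
                = lineLoopA [] true true ('\\' :: acc) := by
              rw [loopA_cons]; simp
            rw [step]
            simp [lineLoopA, skipStrB, cutB]
          | d :: r =>
            have hr : r.length ≤ n := by simp at hl; omega
            have step : lineLoopA ('\\' :: d :: r) true false acc
                = lineLoopA r true false (d :: '\\' :: acc) := by
              rw [loopA_cons]; simp [loopA_cons]
            rw [step, (ih r hr).2 (d :: '\\' :: acc)]
            have hs : skipStrB ('\\' :: d :: r) = 2 + skipStrB r := by
              simp [skipStrB]
            rw [hs, take_cons_two_add, drop_cons_two_add]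
            simp
        · by_cases hq : c = '"'
          · subst hq
            have step : lineLoopA ('"' :: rest) true false acc
                = lineLoopA rest false false ('"' :: acc) := by
              rw [loopA_cons]; simp [hb]
            rw [step, (ih rest hrest).1 ('"' :: acc)]
            have hs : skipStrB ('"' :: rest) = 1 := by
              rw [skipStrB.eq_def]; simp [hb]
            rw [hs]
            simp
          · have step : lineLoopA (c :: rest) true false acc
                = lineLoopA rest true false (c :: acc) := by
              rw [loopA_cons]; simp [hb, hq]
            rw [step, (ih rest hrest).2 (c :: acc)]
            have hs : skipStrB (c :: rest) = 1 + skipStrB rest := by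
              rw [skipStrB.eq_def]; simp [hb, hq]
            rw [hs, take_cons_one_add, drop_cons_one_add]
            simp

theorem lineLoopA_eq (l : List Char) :
    lineLoopA l false false [] = l.take (cutB l) := by
  simpa using (lineLoopA_eq_aux l.length l le_rfl).1 []

-- ===== VERDICT (by name: the statement is the Claim_ definition above) =====
theorem clean_toon_input_py_spec : Claim_equal_clean_toon_input_py := by
  intro text _
  unfold Spec_clean_toon_input_py clean_toon_input_py clean_toon_input_py_alt
  have hf : (fun line : List Char => lineLoopA line false false [])
      = (fun line : List Char => line.take (cutB line)) := funext fun l => lineLoopA_eq l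
  rw [hf]
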